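-- pv_equiv track=rewrite | github.com/y00281951/fst-time-nlu | src/english/time_parser.py | _is_periodic_expression
-- ===== SOURCE A (Python) =====
-- def _is_periodic_expression(tokens):
--     """
--     Check if the token sequence represents a periodic expression
--
--     Args:
--         tokens (list): List of tagged tokens
--
--     Returns:
--         bool: True if this is a periodic expression (should return empty result)
--     """
--     if not tokens:
--         return False
--
--     # Check for "every" + time expression patterns
--     for i, token in enumerate(tokens):
--         if token.get("type") == "token" and token.get("value", "").strip().lower() == "every":
--
--             # Look for time-related tokens after "every"
--             for j in range(i + 1, len(tokens)):
--                 next_token = tokens[j]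
--                 if next_token.get("type") in [
--                     "time_weekday",
--                     "time_relative",
--                     "time_utc",
--                     "time_holiday",
--                 ]:
--                     return True
--                 # Skip empty tokens
--                 if (
--                     next_token.get("type") == "token"
--                     and next_token.get("value", "").strip() == ""
--                 ):
--                     continue
--                 # If we hit a non-empty non-time token, stop looking
--                 break
--
--     return False
-- ===== SOURCE B (Python) =====
-- def _is_periodic_expression(tokens):
--     # Filter out empty 'token' tokens once, then do a single adjacency scan.
--     kept = [
--         t for t in tokens
--         if not (t.get("type") == "token" and t.get("value", "").strip() == "")
--     ]
--     for i, t in enumerate(kept):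
--         if t.get("type") == "token" and t.get("value", "").strip().lower() == "every":
--             if i + 1 < len(kept) and kept[i + 1].get("type") in (
--                 "time_weekday",
--                 "time_relative",
--                 "time_utc",
--                 "time_holiday",
--             ):
--                 return True
--     return False
-- ===== Notes on version B (the rewrite author's own statement) =====
-- stated objective: simpler
-- what changed: Replaces the nested skip-ahead inner loop with a one-time filter of empty 'token' tokens followed by a single adjacency scan.
import Mathlib
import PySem

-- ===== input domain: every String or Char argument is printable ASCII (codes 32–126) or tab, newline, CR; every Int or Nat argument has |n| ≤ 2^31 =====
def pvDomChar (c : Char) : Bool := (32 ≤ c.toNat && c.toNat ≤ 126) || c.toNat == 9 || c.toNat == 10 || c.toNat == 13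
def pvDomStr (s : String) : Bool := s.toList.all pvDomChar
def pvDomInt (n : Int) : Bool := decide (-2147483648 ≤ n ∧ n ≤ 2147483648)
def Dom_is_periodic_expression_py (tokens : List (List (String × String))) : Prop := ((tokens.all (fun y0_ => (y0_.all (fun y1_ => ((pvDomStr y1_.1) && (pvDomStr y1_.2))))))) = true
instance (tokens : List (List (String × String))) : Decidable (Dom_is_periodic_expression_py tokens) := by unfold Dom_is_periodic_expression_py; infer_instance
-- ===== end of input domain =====

-- B replaces A's nested skip-ahead inner loop by filtering out empty 'token' tokens once and
-- doing a single adjacency scan (objective: simpler).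

-- ===== PORT A =====
-- token.get("type") == "token" and token.get("value", "").strip().lower() == "every"
def pvAEvery (t : List (String × String)) : Bool :=
  t.lookup "type" == some "token" &&
  PySem.Str.lower (PySem.Str.strip ((t.lookup "value").getD "")) == "every"

-- next_token.get("type") in ["time_weekday","time_relative","time_utc","time_holiday"]
def pvATime (t : List (String × String)) : Bool :=
  match t.lookup "type" with
  | some ty => ["time_weekday", "time_relative", "time_utc", "time_holiday"].contains ty
  | none => false

-- next_token.get("type") == "token" and next_token.get("value", "").strip() == ""
def pvAEmpty (t : List (String × String)) : Bool :=
  t.lookup "type" == some "token" && PySem.Str.strip ((t.lookup "value").getD "") == ""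

-- the inner 'for j in range(i+1, len(tokens))' loop: return True / continue / break
def pvAInner : List (List (String × String)) → Bool
  | [] => false
  | t :: rest => if pvATime t then true else if pvAEmpty t then pvAInner rest else false

-- the outer 'for i, token in enumerate(tokens)' loop
def pvALoop : List (List (String × String)) → Bool
  | [] => false
  | t :: rest =>
    if pvAEvery t then (if pvAInner rest then true else pvALoop rest) else pvALoop rest

def is_periodic_expression_py (tokens : List (List (String × String))) : Bool :=
  if tokens.isEmpty then false else pvALoop tokens

-- ===== PORT B =====
-- t.get("type") == "token" and t.get("value", "").strip() == ""   (the filtered-out empties)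
def pvBDrop (t : List (String × String)) : Bool :=
  t.lookup "type" == some "token" && PySem.Str.strip ((t.lookup "value").getD "") == ""

def pvBEvery (t : List (String × String)) : Bool :=
  t.lookup "type" == some "token" &&
  PySem.Str.lower (PySem.Str.strip ((t.lookup "value").getD "")) == "every"

def pvBTime (t : List (String × String)) : Bool :=
  match t.lookup "type" with
  | some ty => ["time_weekday", "time_relative", "time_utc", "time_holiday"].contains ty
  | none => false

-- 'i + 1 < len(kept) and kept[i+1].get("type") in (...)'
def pvBHeadTime (l : List (List (String × String))) : Bool :=
  match l with
  | n :: _ => pvBTime n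
  | [] => false

-- the single 'for i, t in enumerate(kept)' scan
def pvBScan : List (List (String × String)) → Bool
  | [] => false
  | t :: rest => if pvBEvery t && pvBHeadTime rest then true else pvBScan rest

def is_periodic_expression_py_alt (tokens : List (List (String × String))) : Bool :=
  pvBScan (tokens.filter (fun t => !pvBDrop t))

-- ===== PRECONDITION & SPEC =====
def Spec_is_periodic_expression_py (tokens : List (List (String × String))) (out : Bool) : Prop := out = is_periodic_expression_py_alt tokens
instance (tokens : List (List (String × String))) (out : Bool) : Decidable (Spec_is_periodic_expression_py tokens out) := by unfold Spec_is_periodic_expression_py; infer_instance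

-- ===== CLAIM (what is proved, stated in full; the proofs are below) =====
def Claim_equal_is_periodic_expression_py : Prop := ∀ (tokens : List (List (String × String))), Dom_is_periodic_expression_py tokens → Spec_is_periodic_expression_py tokens (is_periodic_expression_py tokens)

-- ===== LEMMAS AND PROOFS =====
-- A's and B's leaf predicates are syntactically the same tests
theorem pvB_drop_eq (t : List (String × String)) : pvBDrop t = pvAEmpty t := rfl
theorem pvB_every_eq (t : List (String × String)) : pvBEvery t = pvAEvery t := rfl
theorem pvB_time_eq (t : List (String × String)) : pvBTime t = pvATime t := rfl

-- an "every" token is never an empty token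
theorem every_not_empty (t : List (String × String)) (h : pvAEvery t = true) :
    pvAEmpty t = false := by
  simp only [pvAEvery, Bool.and_eq_true, beq_iff_eq] at h
  simp only [pvAEmpty, h.1, beq_self_eq_true, Bool.true_and, beq_eq_false_iff_ne, ne_eq]
  intro hs
  rw [hs] at h
  exact absurd h.2 (by decide)

-- a time-typed token is never an empty token
theorem time_not_empty (t : List (String × String)) (h : pvATime t = true) :
    pvAEmpty t = false := by
  unfold pvATime at h
  cases ht : t.lookup "type" with
  | none => rw [ht] at h; exact absurd h (by simp)
  | some ty =>
    rw [ht] at h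
    simp only [pvAEmpty, ht, Bool.and_eq_false_iff]
    left
    rw [beq_eq_false_iff_ne]
    intro hc
    injection hc with hc
    subst hc
    exact absurd h (by decide)

-- A's inner skip loop answers: is the first surviving token after the "every" a time token?
theorem inner_eq_headTime (rest : List (List (String × String))) :
    pvAInner rest = pvBHeadTime (rest.filter (fun t => !pvBDrop t)) := by
  induction rest with
  | nil => rfl
  | cons t r ih =>
    by_cases hT : pvATime t = true
    · have hE := time_not_empty t hT
      simp [pvAInner, hT, List.filter, pvB_drop_eq, hE, pvBHeadTime, pvB_time_eq]
    · have hT' : pvATime t = false := by revert hT; cases pvATime t <;> simp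
      by_cases hE : pvAEmpty t = true
      · simp [pvAInner, hT', hE, List.filter, pvB_drop_eq, ih]
      · have hE' : pvAEmpty t = false := by revert hE; cases pvAEmpty t <;> simp
        simp [pvAInner, hT', hE', List.filter, pvB_drop_eq, pvBHeadTime, pvB_time_eq]

-- the outer loop equals the filtered adjacency scan
theorem loop_eq_scan (ts : List (List (String × String))) :
    pvALoop ts = pvBScan (ts.filter (fun t => !pvBDrop t)) := by
  induction ts with
  | nil => rfl
  | cons t r ih =>
    by_cases hE : pvAEmpty t = true
    · have hEv : pvAEvery t = false := by
        revert hE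
        cases hv : pvAEvery t
        · simp
        · rw [every_not_empty t hv]; simp
      simp [pvALoop, hEv, List.filter, pvB_drop_eq, hE, ih]
    · have hE' : pvAEmpty t = false := by revert hE; cases pvAEmpty t <;> simp
      by_cases hEv : pvAEvery t = true
      · simp only [pvALoop, hEv, if_true, List.filter, pvB_drop_eq, hE', Bool.not_false,
          pvBScan, pvB_every_eq, Bool.true_and, inner_eq_headTime r, ih]
      · have hEv' : pvAEvery t = false := by revert hEv; cases pvAEvery t <;> simp
        simp [pvALoop, hEv', List.filter, pvB_drop_eq, hE', pvBScan, pvB_every_eq, ih]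

-- ===== VERDICT (by name: the statement is the Claim_ definition above) =====
theorem is_periodic_expression_py_spec : Claim_equal_is_periodic_expression_py := by
  intro tokens _
  unfold Spec_is_periodic_expression_py is_periodic_expression_py is_periodic_expression_py_alt
  cases tokens with
  | nil => rfl
  | cons t r => simpa using loop_eq_scan (t :: r)
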